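-- pv_equiv track=rewrite | github.com/kalyanijadhav2006-comp/ds_tasks | Reverse_Stack_Using_Recursion.py | get_bottom
-- ===== SOURCE A (Python) =====
-- def get_bottom(stack):
--     """Helper to pop and return the bottom element of the stack."""
--     top = stack.pop()
--     if not stack:
--
--         return top
--     else:
--         bottom = get_bottom(stack)
--         stack.append(top)  # push back other elements
--         return bottom
-- ===== SOURCE B (Python) =====
-- def get_bottom(stack):
--     """Helper to pop and return the bottom element of the stack."""
--     return stack.pop(0)
-- ===== Notes on version B (the rewrite author's own statement) =====
-- stated objective: faster
-- what changed: Replaces the recursive pop-and-rebuild of the whole stack with a single direct removal of index 0 (stack.pop(0)), keeping the same in-place mutation and IndexError on empty input.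
import Mathlib
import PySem

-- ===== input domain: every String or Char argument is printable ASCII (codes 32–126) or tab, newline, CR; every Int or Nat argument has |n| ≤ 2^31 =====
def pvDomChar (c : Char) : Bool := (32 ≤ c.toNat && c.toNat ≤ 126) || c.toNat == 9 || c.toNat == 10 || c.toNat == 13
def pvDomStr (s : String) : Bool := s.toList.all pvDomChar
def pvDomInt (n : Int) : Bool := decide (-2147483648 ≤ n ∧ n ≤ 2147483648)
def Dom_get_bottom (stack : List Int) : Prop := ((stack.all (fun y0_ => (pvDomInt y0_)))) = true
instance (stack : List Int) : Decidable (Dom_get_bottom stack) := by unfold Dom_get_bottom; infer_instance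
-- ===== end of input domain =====

-- B replaces A's recursive pop-and-rebuild by a direct stack.pop(0); both mutate the
-- argument in place in Python (A and B leave the same remaining stack) — the theorem
-- here is about the RETURN value (the bottom element).


-- ===== PORT A =====
-- top = stack.pop(); if not stack: return top; else: bottom = get_bottom(stack);
-- stack.append(top); return bottom.  The recursive calls operate on stack.dropLast;
-- the append only restores the caller's list and does not affect the return value.
def get_bottom (stack : List Int) : Int :=
  match stack with
  | [] => 0   -- Python raises IndexError here; excluded by Pre_get_bottom
  | x :: xs =>
    let top := (x :: xs).getLast (by simp)
    let rest := (x :: xs).dropLast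
    if rest = [] then top
    else
      let bottom := get_bottom rest
      bottom
termination_by stack.length
decreasing_by simp

-- ===== PORT B =====
-- return stack.pop(0)
def get_bottom_alt (stack : List Int) : Int :=
  match PySem.List.pop? stack 0 with
  | some (v, _) => v
  | none => 0   -- Python raises IndexError here; excluded by Pre_get_bottom

-- ===== PRECONDITION & SPEC =====
-- Pre_ excludes only the empty stack, on which both A and B raise IndexError.
def Pre_get_bottom (stack : List Int) : Prop := stack ≠ []
instance (stack : List Int) : Decidable (Pre_get_bottom stack) := by unfold Pre_get_bottom; infer_instance
def pvWitness_get_bottom : List Int := ([3, 1, 4])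

def Spec_get_bottom (stack : List Int) (out : Int) : Prop := out = get_bottom_alt stack
instance (stack : List Int) (out : Int) : Decidable (Spec_get_bottom stack out) := by unfold Spec_get_bottom; infer_instance

-- ===== CLAIM (what is proved, stated in full; the proofs are below) =====
def Claim_equal_get_bottom : Prop := ∀ (stack : List Int), Dom_get_bottom stack → Pre_get_bottom stack → Spec_get_bottom stack (get_bottom stack)

-- ===== LEMMAS AND PROOFS =====
-- A returns the head (bottom) of a nonempty stack.
theorem get_bottom_cons (x : Int) (xs : List Int) : get_bottom (x :: xs) = x := by
  induction hn : xs.length generalizing xs x with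
  | zero =>
    obtain rfl := List.length_eq_zero_iff.mp hn
    simp [get_bottom]
  | succ n ih =>
    match xs with
    | y :: ys =>
      rw [get_bottom]
      simp only [List.dropLast_cons₂]
      rw [if_neg (by simp)]
      exact ih x _ (by simpa using Nat.succ_injective hn)

theorem get_bottom_alt_cons (x : Int) (xs : List Int) : get_bottom_alt (x :: xs) = x := by
  simp [get_bottom_alt, PySem.List.pop?_zero_cons]

-- ===== VERDICT (by name: the statement is the Claim_ definition above) =====
theorem get_bottom_spec : Claim_equal_get_bottom := by
  intro stack _ hpre
  match stack with
  | [] => exact absurd rfl hpre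
  | x :: xs =>
    show get_bottom (x :: xs) = get_bottom_alt (x :: xs)
    rw [get_bottom_cons, get_bottom_alt_cons]
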